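-- pv_equiv track=rewrite | github.com/Mikecranesync/jarvis-workspace | projects/shoptalk/manual_hunter/services/pdf_chunker_service.py | _combine_pages
-- ===== SOURCE A (Python) =====
-- from typing import List, Optional, Tuple
--
-- def _combine_pages(
--
--     pages: List[Tuple[int, str]]
-- ) -> Tuple[str, List[Tuple[int, int]]]:
--     """
--     Combine page texts and build character-to-page mapping.
--
--     Returns:
--         (full_text, page_map) where page_map is [(page_num, char_start), ...]
--     """
--     full_text = ""
--     page_map = []  # (page_num, char_start)
--
--     for page_num, text in pages:
--         page_map.append((page_num, len(full_text)))
--         full_text += text + "\n\n"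
--
--     return full_text, page_map
-- ===== SOURCE B (Python) =====
-- from typing import List, Tuple
--
-- def _combine_pages(
--     pages: List[Tuple[int, str]]
-- ) -> Tuple[str, List[Tuple[int, int]]]:
--     full_text = "".join(text + "\n\n" for _, text in pages)
--     offs = [0]
--     for _, text in pages:
--         offs.append(offs[-1] + len(text) + 2)
--     page_map = [(num, off) for (num, _), off in zip(pages, offs)]
--     return full_text, page_map
-- ===== Notes on version B (the rewrite author's own statement) =====
-- stated objective: alternative
-- what changed: Replaces the single interleaved loop (string concatenation plus map append) by a one-shot ''.join of the page texts and a separate prefix-sum pass over page lengths, zipped with the page numbers.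
import Mathlib
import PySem

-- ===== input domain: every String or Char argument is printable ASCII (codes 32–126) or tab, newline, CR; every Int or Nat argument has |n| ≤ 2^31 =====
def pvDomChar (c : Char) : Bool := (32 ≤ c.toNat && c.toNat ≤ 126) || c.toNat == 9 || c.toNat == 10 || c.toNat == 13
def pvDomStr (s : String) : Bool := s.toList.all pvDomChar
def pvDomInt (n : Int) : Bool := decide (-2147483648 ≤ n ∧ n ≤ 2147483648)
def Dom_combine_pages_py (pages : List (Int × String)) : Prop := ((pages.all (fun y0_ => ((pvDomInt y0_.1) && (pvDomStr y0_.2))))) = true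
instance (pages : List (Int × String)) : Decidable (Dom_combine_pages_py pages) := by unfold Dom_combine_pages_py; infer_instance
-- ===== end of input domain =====

-- B replaces A's interleaved concatenation loop by a one-shot join plus a separate prefix-sum
-- offset pass; same return value (objective: alternative decomposition).

-- ===== PORT A =====
-- for page_num, text in pages: page_map.append((page_num, len(full_text))); full_text += text + "\n\n"
def combine_pages_py (pages : List (Int × String)) : String × (List (Int × Int)) :=
  pages.foldl
    (fun st p => (st.1 ++ p.2 ++ "\n\n", st.2 ++ [(p.1, (st.1.length : Int))]))
    ("", [])

-- ===== PORT B =====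
-- offs = [0]; for _, text in pages: offs.append(offs[-1] + len(text) + 2)
-- (the running last element offs[-1] is carried alongside the list)
def pvOffs (pages : List (Int × String)) : List Int :=
  (pages.foldl
    (fun (st : List Int × Int) p =>
      (st.1 ++ [st.2 + (p.2.length : Int) + 2], st.2 + (p.2.length : Int) + 2))
    ([0], 0)).1

-- full_text = "".join(text + "\n\n" for _, text in pages);
-- page_map = [(num, off) for (num, _), off in zip(pages, offs)]
def combine_pages_py_alt (pages : List (Int × String)) : String × (List (Int × Int)) :=
  (String.join (pages.map (fun p => p.2 ++ "\n\n")),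
   (pages.zip (pvOffs pages)).map (fun q => (q.1.1, q.2)))

-- ===== PRECONDITION & SPEC =====
def Spec_combine_pages_py (pages : List (Int × String)) (out : String × (List (Int × Int))) : Prop := out = combine_pages_py_alt pages
instance (pages : List (Int × String)) (out : String × (List (Int × Int))) : Decidable (Spec_combine_pages_py pages out) := by unfold Spec_combine_pages_py; infer_instance

-- ===== CLAIM (what is proved, stated in full; the proofs are below) =====
def Claim_equal_combine_pages_py : Prop := ∀ (pages : List (Int × String)), Dom_combine_pages_py pages → Spec_combine_pages_py pages (combine_pages_py pages)

-- ===== LEMMAS AND PROOFS =====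

-- reference offset list: successive running offsets starting from a
def pvOffsRec (pages : List (Int × String)) (a : Int) : List Int :=
  match pages with
  | [] => []
  | p :: r => (a + (p.2.length : Int) + 2) :: pvOffsRec r (a + (p.2.length : Int) + 2)

theorem pvOffs_fold_fst (pages : List (Int × String)) :
    ∀ (acc : List Int) (a : Int),
      (pages.foldl
        (fun (st : List Int × Int) p =>
          (st.1 ++ [st.2 + (p.2.length : Int) + 2], st.2 + (p.2.length : Int) + 2))
        (acc, a)).1
      = acc ++ pvOffsRec pages a := by
  induction pages with
  | nil => intro acc a; simp [pvOffsRec]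
  | cons p r ih =>
      intro acc a
      simp only [List.foldl_cons, pvOffsRec]
      rw [ih]
      simp

theorem pvOffs_eq (pages : List (Int × String)) :
    pvOffs pages = 0 :: pvOffsRec pages 0 := by
  unfold pvOffs
  rw [pvOffs_fold_fst]
  rfl

-- A-side page_map characterisation
def pvMapRec (pages : List (Int × String)) (a : Int) : List (Int × Int) :=
  match pages with
  | [] => []
  | p :: r => (p.1, a) :: pvMapRec r (a + (p.2.length : Int) + 2)

theorem zip_map_eq (pages : List (Int × String)) :
    ∀ (a : Int),
      (pages.zip (a :: pvOffsRec pages a)).map (fun q => (q.1.1, q.2)) = pvMapRec pages a := by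
  induction pages with
  | nil => intro a; simp [pvMapRec]
  | cons p r ih =>
      intro a
      simp only [pvOffsRec, List.zip_cons_cons, List.map_cons, pvMapRec]
      rw [ih]

theorem join_cons (s : String) (l : List String) :
    String.join (s :: l) = s ++ String.join l := by
  simp [String.join_eq]

theorem foldA (pages : List (Int × String)) :
    ∀ (s : String) (m : List (Int × Int)),
      pages.foldl
        (fun st p => (st.1 ++ p.2 ++ "\n\n", st.2 ++ [(p.1, (st.1.length : Int))]))
        (s, m)
      = (s ++ String.join (pages.map (fun p => p.2 ++ "\n\n")),
         m ++ pvMapRec pages (s.length : Int)) := by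
  induction pages with
  | nil => intro s m; simp [pvMapRec, String.join]
  | cons p r ih =>
      intro s m
      simp only [List.foldl_cons, List.map_cons, pvMapRec]
      rw [ih, join_cons]
      have hlen : ((s ++ p.2 ++ "\n\n").length : Int)
          = (s.length : Int) + (p.2.length : Int) + 2 := by
        simp [String.length_append]
        rfl
      rw [hlen]
      simp [String.append_assoc]

-- ===== VERDICT (by name: the statement is the Claim_ definition above) =====
theorem combine_pages_py_spec : Claim_equal_combine_pages_py := by
  intro pages _
  unfold Spec_combine_pages_py combine_pages_py combine_pages_py_alt
  rw [pvOffs_eq, zip_map_eq, foldA]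
  simp
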